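-- pv_equiv track=rewrite | github.com/tezheng/ModelInsider | modelexport/hierarchy_exporter.py | _generate_onnx_path_variants
-- ===== SOURCE A (Python) =====
-- def _generate_onnx_path_variants(module_name):
--     """Generate ONNX path variants for a module name."""
--     variants = []
--
--     # Convert dots to slashes: encoder.layer.0.attention.self -> /encoder/layer.0/attention/self
--     onnx_path = '/' + module_name.replace('.', '/')
--     variants.append(onnx_path)
--
--     # Add partial paths for prefix matching
--     parts = module_name.split('.')
--     for i in range(1, len(parts) + 1):
--         partial_path = '/' + '/'.join(parts[:i])
--         variants.append(partial_path)
--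
--     return variants
-- ===== SOURCE B (Python) =====
-- def _generate_onnx_path_variants(module_name):
--     """Generate ONNX path variants for a module name (single accumulator pass)."""
--     prefixes = []
--     acc = ''
--     for part in module_name.split('.'):
--         acc = acc + '/' + part
--         prefixes.append(acc)
--     # the full slashed path is exactly the final accumulator value
--     return [acc] + prefixes
-- ===== Notes on version B (the rewrite author's own statement) =====
-- stated objective: simpler
-- what changed: B builds all prefix paths in one pass with a running accumulator (appending '/'+part each step) and reuses the final accumulator as the full path, instead of A's replace() plus a loop that re-slices and re-joins the parts list for every prefix.
import Mathlib
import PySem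

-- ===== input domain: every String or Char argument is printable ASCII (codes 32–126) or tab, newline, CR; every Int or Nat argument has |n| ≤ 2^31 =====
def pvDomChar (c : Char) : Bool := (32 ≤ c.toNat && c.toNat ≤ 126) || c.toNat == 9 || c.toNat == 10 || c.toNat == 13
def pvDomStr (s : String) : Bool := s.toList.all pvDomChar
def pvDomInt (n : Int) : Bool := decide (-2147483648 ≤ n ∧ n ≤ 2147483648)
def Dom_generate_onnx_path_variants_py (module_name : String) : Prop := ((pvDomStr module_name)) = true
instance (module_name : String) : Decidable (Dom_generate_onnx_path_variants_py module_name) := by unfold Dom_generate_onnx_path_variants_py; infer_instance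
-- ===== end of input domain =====

-- B builds all prefix paths in one pass with a running accumulator and reuses its final
-- value as the full path, instead of A's replace() plus per-prefix slice-and-join (objective: simpler).


-- ===== PORT A =====
def generate_onnx_path_variants_py (module_name : String) : List String :=
  let variants : List String := []
  -- onnx_path = '/' + module_name.replace('.', '/')
  let onnx_path : List Char := '/' :: PySem.Chars.replace module_name.toList ['.'] ['/']
  let variants := variants ++ [String.ofList onnx_path]
  -- parts = module_name.split('.')
  let parts := PySem.Chars.splitOn module_name.toList ['.']
  -- for i in range(1, len(parts) + 1): variants.append('/' + '/'.join(parts[:i]))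
  (PySem.List.pyRange 1 ((parts.length : Int) + 1) 1).foldl
    (fun vs i =>
      let partial_path : List Char :=
        '/' :: PySem.Chars.join ['/'] (PySem.List.slice parts none (some i))
      vs ++ [String.ofList partial_path])
    variants

-- ===== PORT B =====
def generate_onnx_path_variants_py_alt (module_name : String) : List String :=
  -- prefixes = []; acc = ''; for part in split: acc = acc + '/' + part; prefixes.append(acc)
  let st := (PySem.Chars.splitOn module_name.toList ['.']).foldl
    (fun (st : List String × List Char) part =>
      let acc := st.2 ++ '/' :: part
      (st.1 ++ [String.ofList acc], acc))
    ([], [])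
  -- return [acc] + prefixes
  String.ofList st.2 :: st.1

-- ===== PRECONDITION & SPEC =====
def Spec_generate_onnx_path_variants_py (module_name : String) (out : List String) : Prop := out = generate_onnx_path_variants_py_alt module_name
instance (module_name : String) (out : List String) : Decidable (Spec_generate_onnx_path_variants_py module_name out) := by unfold Spec_generate_onnx_path_variants_py; infer_instance

-- ===== CLAIM (what is proved, stated in full; the proofs are below) =====
def Claim_equal_generate_onnx_path_variants_py : Prop := ∀ (module_name : String), Dom_generate_onnx_path_variants_py module_name → Spec_generate_onnx_path_variants_py module_name (generate_onnx_path_variants_py module_name)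

-- ===== LEMMAS AND PROOFS =====

-- single-char '.'→'/' substitution
def pvSubst (c : Char) : Char := if c = '.' then '/' else c

-- recursive model of split('.') with an explicit current-piece accumulator
def pvSp : List Char → List Char → List (List Char)
  | cur, [] => [cur]
  | cur, c :: t => if c = '.' then cur :: pvSp [] t else pvSp (cur ++ [c]) t

-- model of B's loop: the list of prefixes, and the final accumulator
def pvPref : List Char → List (List Char) → List (List Char)
  | _, [] => []
  | acc, p :: t => (acc ++ '/' :: p) :: pvPref (acc ++ '/' :: p) t

def pvLast : List Char → List (List Char) → List Char
  | acc, [] => acc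
  | acc, p :: t => pvLast (acc ++ '/' :: p) t

theorem pvSp_ne_nil (cur l : List Char) : pvSp cur l ≠ [] := by
  induction l generalizing cur with
  | nil => simp [pvSp]
  | cons c t ih =>
    simp only [pvSp]
    split_ifs
    · simp
    · exact ih _

theorem replace_go_eq (l : List Char) : ∀ (fuel : Nat) (acc : List Char),
    l.length ≤ fuel →
    PySem.Chars.replace.go ['.'] ['/'] fuel l acc = acc.reverse ++ l.map pvSubst := by
  induction l with
  | nil =>
    intro fuel acc _
    cases fuel <;> simp [PySem.Chars.replace.go]
  | cons c t ih =>
    intro fuel acc hle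
    cases fuel with
    | zero => simp at hle
    | succ f =>
      rw [PySem.Chars.replace.go]
      simp only [List.isPrefixOf, List.length_cons] at *
      by_cases hc : c = '.'
      · simp [hc, ih f _ (by omega), pvSubst]
      · have hb : (('.':Char) == c) = false := by simpa [beq_eq_false_iff_ne] using Ne.symm hc
        simp [hb, ih f _ (by omega), pvSubst, hc]

theorem replace_eq (cs : List Char) :
    PySem.Chars.replace cs ['.'] ['/'] = cs.map pvSubst := by
  rw [PySem.Chars.replace]
  simp [replace_go_eq cs cs.length [] le_rfl]

theorem split_go_eq (l : List Char) : ∀ (fuel : Nat) (cur : List Char) (acc : List (List Char)),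
    l.length ≤ fuel →
    PySem.Chars.splitOn.go ['.'] fuel l cur acc = acc.reverse ++ pvSp cur.reverse l := by
  induction l with
  | nil =>
    intro fuel cur acc _
    cases fuel <;> simp [PySem.Chars.splitOn.go, pvSp]
  | cons c t ih =>
    intro fuel cur acc hle
    cases fuel with
    | zero => simp at hle
    | succ f =>
      rw [PySem.Chars.splitOn.go]
      simp only [List.isPrefixOf, List.length_cons] at *
      by_cases hc : c = '.'
      · simp [hc, ih f [] (cur.reverse :: acc) (by omega), pvSp]
      · have hb : (('.':Char) == c) = false := by simpa [beq_eq_false_iff_ne] using Ne.symm hc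
        have h2 := ih f (c :: cur) acc (by omega)
        simp only [List.reverse_cons] at h2
        simp [hb, h2, pvSp, hc]

theorem splitOn_eq (cs : List Char) :
    PySem.Chars.splitOn cs ['.'] = pvSp [] cs := by
  rw [PySem.Chars.splitOn]
  simpa using split_go_eq cs (cs.length + 1) [] [] (by omega)

theorem join_pvSp (l cur : List Char) :
    PySem.Chars.join ['/'] (pvSp cur l) = cur ++ l.map pvSubst := by
  induction l generalizing cur with
  | nil => simp [pvSp, PySem.Chars.join_singleton]
  | cons c t ih =>
    simp only [pvSp]
    by_cases hc : c = '.'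
    · obtain ⟨q, rest, hq⟩ := List.exists_cons_of_ne_nil (pvSp_ne_nil [] t)
      rw [if_pos hc, hq, PySem.Chars.join_cons_cons, ← hq, ih []]
      simp [pvSubst, hc]
    · rw [if_neg hc, ih]
      simp [pvSubst, hc]

theorem slash_join (qs : List (List Char)) (h : qs ≠ []) :
    '/' :: PySem.Chars.join ['/'] qs = qs.flatMap (fun p => '/' :: p) := by
  induction qs with
  | nil => exact absurd rfl h
  | cons p rest ih =>
    cases rest with
    | nil => simp [PySem.Chars.join_singleton]
    | cons q r =>
      have h2 := ih (by simp)
      rw [PySem.Chars.join_cons_cons]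
      simp only [List.append_assoc, List.singleton_append, h2]
      simp

theorem pvLast_eq (ps : List (List Char)) : ∀ acc,
    pvLast acc ps = acc ++ ps.flatMap (fun p => '/' :: p) := by
  induction ps with
  | nil => simp [pvLast]
  | cons p t ih => intro acc; simp [pvLast, ih]

theorem pvPref_eq (ps : List (List Char)) : ∀ acc,
    pvPref acc ps = (List.range ps.length).map
      (fun k => acc ++ (ps.take (k + 1)).flatMap (fun p => '/' :: p)) := by
  induction ps with
  | nil => simp [pvPref]
  | cons p t ih =>
    intro acc
    simp only [pvPref, List.length_cons, List.range_succ_eq_map, List.map_cons, List.map_map, ih]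
    congr 1
    · simp
    · apply List.map_congr_left
      intro k _
      simp [Function.comp, Nat.succ_eq_add_one, List.take_succ_cons]

theorem foldB_eq (ps : List (List Char)) : ∀ (l : List String) (acc : List Char),
    ps.foldl (fun (st : List String × List Char) part =>
        (st.1 ++ [String.ofList (st.2 ++ '/' :: part)], st.2 ++ '/' :: part)) (l, acc)
      = (l ++ (pvPref acc ps).map String.ofList, pvLast acc ps) := by
  induction ps with
  | nil => simp [pvPref, pvLast]
  | cons p t ih =>
    intro l acc
    simp only [List.foldl_cons, ih, pvPref, pvLast, List.map_cons]
    simp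

theorem pyRange_shift (n : Nat) :
    PySem.List.pyRange 1 ((n : Int) + 1) 1 = (List.range n).map (fun (k : Nat) => ((k : Int) + 1)) := by
  induction n with
  | zero => simp [PySem.List.pyRange]
  | succ m ih =>
    rw [show ((m + 1 : Nat) : Int) + 1 = ((m : Int) + 1) + 1 by push_cast; ring]
    rw [PySem.List.pyRange_one_succ_right (by omega), ih, List.range_succ]
    simp

theorem take_flat_eq (ps : List (List Char)) (hps : ps ≠ []) (k : Nat) :
    '/' :: PySem.Chars.join ['/'] (ps.take (k + 1)) = (ps.take (k + 1)).flatMap (fun p => '/' :: p) := by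
  apply slash_join
  simp [List.take_eq_nil_iff, hps]

-- ===== VERDICT (by name: the statement is the Claim_ definition above) =====
theorem generate_onnx_path_variants_py_spec : Claim_equal_generate_onnx_path_variants_py := by
  intro s _
  unfold Spec_generate_onnx_path_variants_py
  unfold generate_onnx_path_variants_py generate_onnx_path_variants_py_alt
  simp only [splitOn_eq, replace_eq, List.nil_append]
  set ps := pvSp [] s.toList with hps
  have hne : ps ≠ [] := pvSp_ne_nil [] s.toList
  rw [foldB_eq, PySem.List.foldl_append_singleton_eq_map
    (fun i => String.ofList ('/' :: PySem.Chars.join ['/'] (PySem.List.slice ps none (some i))))]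
  simp only [List.singleton_append]
  congr 1
  · -- heads: '/' :: map pvSubst = pvLast [] ps
    rw [pvLast_eq, ← slash_join ps hne, hps, join_pvSp]
    simp
  · -- tails
    rw [pyRange_shift, pvPref_eq, List.map_map, List.map_map]
    apply List.map_congr_left
    intro k _
    simp only [Function.comp_apply, List.nil_append]
    rw [show ((k : Int) + 1) = (((k + 1 : Nat)) : Int) by push_cast; ring,
      PySem.List.slice_to_natCast, take_flat_eq ps hne k]
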